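-- pv_equiv track=rewrite | github.com/looooopiii/Tooth-Presence-Classification | Augmented_One_Tooth_Pipeline/evaluate_all.py | _infer_backbone_from_state_dict
-- ===== SOURCE A (Python) =====
-- def _infer_backbone_from_state_dict(sd: dict) -> str:
--     """
--     Infer resnet backbone variant from a torchvision-style state_dict.
--     Returns one of: 'resnet18', 'resnet34', 'resnet50'
--     Heuristics:
--       - If any key matches 'layer\d\.\d\.conv3.weight' => bottleneck => resnet50 (2048-d head).
--       - Else basic block family (conv1/conv2 only):
--           * If there exists a block index >=2 in any layer (e.g., 'layer2.2.' or 'layer3.2.') -> resnet34 (3/4/6/3 blocks),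
--             otherwise -> resnet18 (2/2/2/2 blocks).
--     """
--     keys = list(sd.keys())
--     # normalize possible 'model.' or 'base.' prefixes
--     def norm(k):
--         for pref in ("model.", "base."):
--             if k.startswith(pref):
--                 return k[len(pref):]
--         return k
--     nkeys = [norm(k) for k in keys]
--     # 1) bottleneck check: conv3 exists in bottleneck blocks (resnet50/101)
--     if any((".conv3.weight" in k and k.startswith("layer")) for k in nkeys):
--         return "resnet50"
--     # 2) basic block family: inspect max block index per layer
--     # if any layer has index >=2 (0-based), it's likely resnet34
--     import re
--     pat = re.compile(r"^layer([1-4])\.(\d+)\.")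
--     max_idx = {1:-1,2:-1,3:-1,4:-1}
--     for k in nkeys:
--         m = pat.match(k)
--         if m:
--             li = int(m.group(1))
--             bi = int(m.group(2))
--             if bi > max_idx[li]:
--                 max_idx[li] = bi
--     # resnet34 has blocks per layer: [3,4,6,3] -> max indices [2,3,5,2]
--     # resnet18 has blocks per layer: [2,2,2,2] -> max indices [1,1,1,1]
--     if any(max_idx[l] >= 2 for l in (1,2,3,4)):
--         return "resnet34"
--     return "resnet18"
-- ===== SOURCE B (Python) =====
-- def _score(k: str) -> int:
--     # evidence level of one normalized key: 2 = bottleneck, 1 = basic block index >= 2, 0 = none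
--     if not k.startswith("layer"):
--         return 0
--     if ".conv3.weight" in k:
--         return 2
--     rest = k[5:]
--     if len(rest) >= 2 and rest[0] in "1234" and rest[1] == ".":
--         i = 2
--         while i < len(rest) and rest[i].isdigit():
--             i += 1
--         if i > 2 and i < len(rest) and rest[i] == "." and int(rest[2:i]) >= 2:
--             return 1
--     return 0
--
--
-- def _infer_backbone_from_state_dict(sd: dict) -> str:
--     best = 0
--     for k in sd.keys():
--         if k.startswith("model."):
--             k = k[6:]
--         elif k.startswith("base."):
--             k = k[5:]
--         best = max(best, _score(k))
--     return ("resnet18", "resnet34", "resnet50")[best]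
-- ===== Notes on version B (the rewrite author's own statement) =====
-- stated objective: alternative
-- what changed: B makes one pass that maps each key to an evidence score (2 bottleneck, 1 block-index>=2, 0 none) parsed by hand with string ops instead of a regex, keeps only the running maximum, and indexes the result table by that maximum, replacing A's two staged scans and per-layer max-index dictionary.
import Mathlib
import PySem

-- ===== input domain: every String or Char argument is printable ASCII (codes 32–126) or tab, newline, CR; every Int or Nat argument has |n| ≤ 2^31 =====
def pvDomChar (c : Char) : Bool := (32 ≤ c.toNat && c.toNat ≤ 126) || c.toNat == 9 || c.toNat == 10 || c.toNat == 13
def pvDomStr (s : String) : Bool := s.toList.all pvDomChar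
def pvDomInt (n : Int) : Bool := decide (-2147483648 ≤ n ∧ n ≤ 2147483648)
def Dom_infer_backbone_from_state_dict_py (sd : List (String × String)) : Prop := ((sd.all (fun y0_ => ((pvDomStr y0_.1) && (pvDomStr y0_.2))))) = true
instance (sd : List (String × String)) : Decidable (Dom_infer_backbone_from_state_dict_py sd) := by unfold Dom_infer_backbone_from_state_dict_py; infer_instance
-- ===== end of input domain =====

-- B replaces A's two staged scans and per-layer max-index dictionary with a single pass that
-- assigns each key an evidence score (2 bottleneck / 1 block-index>=2 / 0) and keeps the running
-- maximum, parsing keys by hand instead of a regex; objective: alternative decomposition.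


-- ===== PORT A =====
-- shared helper: the inner `norm` closure (identical in A and B)
def pvNorm (k : String) : String :=
  if PySem.Str.startswith k "model." then PySem.Str.slice k (some 6) none
  else if PySem.Str.startswith k "base." then PySem.Str.slice k (some 5) none
  else k

-- shared helper: int value of a nonempty ASCII digit run (Python's int() of a digit string)
def pvDigitsVal (ds : List Char) : Int :=
  ds.foldl (fun a c => a * 10 + ((c.toNat : Int) - 48)) 0

-- A-side helper: the regex `^layer([1-4])\.(\d+)\.` — returns (int(group 1), int(group 2)) on a match.
-- Hand-ported, exact on any string: literal "layer", one char of the class [1-4], '.', a maximal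
-- nonempty digit run (greedy \d+ needs no backtracking since the following '.' is not a digit), then '.'.
def pvLayerMatch (k : String) : Option (Int × Int) :=
  match k.toList with
  | 'l'::'a'::'y'::'e'::'r'::c::'.'::rest =>
      if "1234".toList.contains c then
        match rest.takeWhile Char.isDigit, rest.drop (rest.takeWhile Char.isDigit).length with
        | [], _ => none
        | d::ds, '.'::_ => some (((c.toNat : Int) - 48), pvDigitsVal (d::ds))
        | _::_, _ => none
      else none
  | _ => none

-- A's loop body: update the max-index dict from one normalized key
def pvStep (d : PySem.Dict Int Int) (k : String) : PySem.Dict Int Int :=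
  match pvLayerMatch k with
  | some (li, bi) => if bi > d.getD li (-1) then d.insert li bi else d
  | none => d

def pvInitDict : PySem.Dict Int Int :=
  PySem.Dict.ofList [((1:Int), (-1:Int)), (2, -1), (3, -1), (4, -1)]

def infer_backbone_from_state_dict_py (sd : List (String × String)) : String :=
  let keys := sd.map (fun p => p.1)
  let nkeys := keys.map pvNorm
  if nkeys.any (fun k => PySem.Str.isIn ".conv3.weight" k && PySem.Str.startswith k "layer") then
    "resnet50"
  else
    let max_idx := nkeys.foldl pvStep pvInitDict
    if [(1:Int), 2, 3, 4].any (fun l => decide (max_idx.getD l (-1) ≥ 2)) then "resnet34"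
    else "resnet18"

-- ===== PORT B =====
-- B's `_score`: evidence level of one normalized key (2 bottleneck / 1 basic block idx >= 2 / 0 none).
-- The while loop over digits is the takeWhile; `int(rest[2:i])` is pvDigitsVal of that run.
def pvScore (k : String) : Nat :=
  if !(PySem.Str.startswith k "layer") then 0
  else if PySem.Str.isIn ".conv3.weight" k then 2
  else
    match k.toList.drop 5 with
    | c :: d :: rest2 =>
      if "1234".toList.contains c && decide (d = '.') then
        if decide (rest2.takeWhile Char.isDigit ≠ []) &&
           decide ((rest2.drop (rest2.takeWhile Char.isDigit).length).head? = some '.') &&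
           decide (2 ≤ pvDigitsVal (rest2.takeWhile Char.isDigit)) then 1 else 0
      else 0
    | _ => 0

def infer_backbone_from_state_dict_py_alt (sd : List (String × String)) : String :=
  let best := sd.foldl (fun best p => max best (pvScore (pvNorm p.1))) 0
  if best = 0 then "resnet18" else if best = 1 then "resnet34" else "resnet50"

-- ===== PRECONDITION & SPEC =====
def Spec_infer_backbone_from_state_dict_py (sd : List (String × String)) (out : String) : Prop := out = infer_backbone_from_state_dict_py_alt sd
instance (sd : List (String × String)) (out : String) : Decidable (Spec_infer_backbone_from_state_dict_py sd out) := by unfold Spec_infer_backbone_from_state_dict_py; infer_instance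

-- ===== CLAIM (what is proved, stated in full; the proofs are below) =====
def Claim_equal_infer_backbone_from_state_dict_py : Prop := ∀ (sd : List (String × String)), Dom_infer_backbone_from_state_dict_py sd → Spec_infer_backbone_from_state_dict_py sd (infer_backbone_from_state_dict_py sd)

-- ===== LEMMAS AND PROOFS =====

-- A-side conv3/bottleneck condition and B-side "matched block index >= 2" test, named for the proofs
def pvConv (k : String) : Bool :=
  PySem.Str.isIn ".conv3.weight" k && PySem.Str.startswith k "layer"

def pvGE2 (k : String) : Bool :=
  match pvLayerMatch k with
  | some (_, bi) => decide (bi ≥ 2)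
  | none => false

-- a match's layer number is one of 1,2,3,4
lemma pvLayerMatch_fst {k : String} {li bi : Int}
    (h : pvLayerMatch k = some (li, bi)) : li = 1 ∨ li = 2 ∨ li = 3 ∨ li = 4 := by
  unfold pvLayerMatch at h
  split at h
  · rename_i c rest heq
    split at h
    · rename_i hc
      have : c = '1' ∨ c = '2' ∨ c = '3' ∨ c = '4' := by
        simpa [List.contains_eq_mem, or_assoc] using hc
      split at h
      · exact absurd h (by simp)
      · injection h with h'
        injection h' with h1' _
        subst h1'
        rcases this with rfl | rfl | rfl | rfl <;> simp
      · exact absurd h (by simp)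
    · exact absurd h (by simp)
  · exact absurd h (by simp)

-- one step of A's loop, read off the dict
lemma getD_pvStep (d : PySem.Dict Int Int) (k : String) (l : Int) :
    2 ≤ (pvStep d k).getD l (-1) ↔
      2 ≤ d.getD l (-1) ∨ ∃ bi, pvLayerMatch k = some (l, bi) ∧ 2 ≤ bi := by
  unfold pvStep
  cases h : pvLayerMatch k with
  | none => simp
  | some p =>
    obtain ⟨li, bi⟩ := p
    by_cases hgt : bi > d.getD li (-1)
    · simp only [hgt, if_true]
      rw [PySem.Dict.getD_insert]
      by_cases hl : l = li
      · rw [if_pos hl]; subst hl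
        constructor
        · intro hb; exact Or.inr ⟨bi, rfl, hb⟩
        · rintro (hd | ⟨bi', hm, hb⟩)
          · omega
          · injection hm with hm'; injection hm' with _ h2; omega
      · simp only [if_neg hl]
        constructor
        · intro hd; exact Or.inl hd
        · rintro (hd | ⟨bi', hm, _⟩)
          · exact hd
          · injection hm with hm'; injection hm' with h1 _; exact absurd h1.symm hl
    · simp only [hgt, if_false]
      constructor
      · intro hd; exact Or.inl hd
      · rintro (hd | ⟨bi', hm, hb⟩)
        · exact hd
        · injection hm with hm'; injection hm' with h1 h2
          subst h1; subst h2; omega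

-- A's whole loop, read off the dict
lemma getD_foldl_pvStep (ks : List String) (d : PySem.Dict Int Int) (l : Int) :
    2 ≤ (ks.foldl pvStep d).getD l (-1) ↔
      2 ≤ d.getD l (-1) ∨ ∃ k ∈ ks, ∃ bi, pvLayerMatch k = some (l, bi) ∧ 2 ≤ bi := by
  induction ks generalizing d with
  | nil => simp
  | cons k ks ih =>
    simp only [List.foldl_cons, ih, getD_pvStep, List.mem_cons]
    constructor
    · rintro ((hd | ⟨bi, hm, hb⟩) | ⟨k', hk', bi, hm, hb⟩)
      · exact Or.inl hd
      · exact Or.inr ⟨k, Or.inl rfl, bi, hm, hb⟩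
      · exact Or.inr ⟨k', Or.inr hk', bi, hm, hb⟩
    · rintro (hd | ⟨k', hk' | hk', bi, hm, hb⟩)
      · exact Or.inl (Or.inl hd)
      · subst hk'; exact Or.inl (Or.inr ⟨bi, hm, hb⟩)
      · exact Or.inr ⟨k', hk', bi, hm, hb⟩

-- A's dict-based resnet34 condition, as an existence test over the keys
lemma dict_cond_eq (nkeys : List String) :
    ([(1:Int), 2, 3, 4].any (fun l => decide ((nkeys.foldl pvStep pvInitDict).getD l (-1) ≥ 2)))
      = nkeys.any pvGE2 := by
  rw [Bool.eq_iff_iff]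
  simp only [List.any_eq_true, decide_eq_true_eq, List.mem_cons,
    List.not_mem_nil, or_false]
  constructor
  · rintro ⟨l, hl, hge⟩
    rw [ge_iff_le, getD_foldl_pvStep] at hge
    rcases hge with hd | ⟨k, hk, bi, hm, hb⟩
    · rcases hl with rfl | rfl | rfl | rfl <;> exact absurd hd (by decide)
    · refine ⟨k, hk, ?_⟩
      unfold pvGE2; rw [hm]; simpa using hb
  · rintro ⟨k, hk, hp⟩
    unfold pvGE2 at hp
    cases hm : pvLayerMatch k with
    | none => rw [hm] at hp; simp at hp
    | some p =>
      obtain ⟨li, bi⟩ := p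
      rw [hm] at hp
      simp only [decide_eq_true_eq] at hp
      refine ⟨li, pvLayerMatch_fst hm, ?_⟩
      rw [ge_iff_le, getD_foldl_pvStep]
      exact Or.inr ⟨k, hk, bi, hm, hp⟩

lemma pvLayerMatch_none_of_not_prefix {k : String}
    (h : ¬ ("layer".toList <+: k.toList)) : pvLayerMatch k = none := by
  unfold pvLayerMatch
  split
  · rename_i c rest heq
    exact absurd ⟨c :: '.' :: rest, by simp [heq]⟩ h
  · rfl

lemma pvScore_le_two (k : String) : pvScore k ≤ 2 := by
  unfold pvScore
  repeat' split
  all_goals omega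

-- score 2 exactly on A's bottleneck condition
lemma pvScore_eq_two_iff (k : String) : pvScore k = 2 ↔ pvConv k = true := by
  unfold pvScore pvConv
  cases hs : PySem.Str.startswith k "layer" with
  | false =>
    simp only [hs, Bool.not_false, if_true, Bool.and_false]
    simp
  | true =>
    simp only [hs, Bool.not_true, Bool.false_eq_true, if_false, Bool.and_true]
    cases hi : PySem.Str.isIn ".conv3.weight" k with
    | true => simp only [hi, if_true]
    | false =>
      simp only [hi, Bool.false_eq_true, if_false]
      constructor
      · intro h2
        exfalso
        rcases h5 : k.toList.drop 5 with _ | ⟨c, _ | ⟨d, r⟩⟩ <;> rw [h5] at h2 <;>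
          revert h2 <;> (repeat' split) <;> omega
      · intro h; exact absurd h (by simp)

lemma pvScore_eq_one_iff {k : String} (hconv : pvConv k = false) :
    pvScore k = 1 ↔ pvGE2 k = true := by
  unfold pvConv at hconv
  cases hs : PySem.Str.startswith k "layer" with
  | false =>
    have hpre : ¬ ("layer".toList <+: k.toList) := by
      intro hp
      have := (PySem.Chars.startswith_iff k.toList "layer".toList).mpr hp
      rw [← PySem.Str.startswith_eq] at this
      rw [hs] at this; exact absurd this (by simp)
    unfold pvScore pvGE2
    rw [pvLayerMatch_none_of_not_prefix hpre, hs]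
    simp
  | true =>
    have hi : PySem.Str.isIn ".conv3.weight" k = false := by
      cases hB : PySem.Str.isIn ".conv3.weight" k
      · rfl
      · rw [hB, hs] at hconv; simp at hconv
    have hpre : "layer".toList <+: k.toList := by
      have h' := hs; rw [PySem.Str.startswith_eq] at h'
      exact (PySem.Chars.startswith_iff _ _).mp h'
    obtain ⟨t, ht⟩ := hpre
    have hk : k.toList = 'l'::'a'::'y'::'e'::'r'::t := by rw [← ht]; rfl
    have hdrop : k.toList.drop 5 = t := by rw [hk]; rfl
    unfold pvScore pvGE2 pvLayerMatch
    rw [hs, hi, hdrop, hk]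
    simp only [Bool.not_true, Bool.false_eq_true, if_false]
    match t with
    | [] => simp
    | [c] => simp
    | c :: d :: rest2 =>
      by_cases hd : d = '.'
      · subst hd
        by_cases hc : "1234".toList.contains c = true
        · simp only [hc, decide_true, Bool.and_true, if_true]
          cases hds : rest2.takeWhile Char.isDigit with
          | nil =>
            simp
          | cons d' ds' =>
            cases hdr : rest2.drop (d' :: ds').length with
            | nil => simp
            | cons e es =>
              by_cases he : e = '.'
              · subst he
                simp [ge_iff_le]
                omega
              · cases e
                simp only [List.head?]
                constructor
                · intro hx
                  exfalso
                  revert hx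
                  split <;> simp_all
                · intro hx
                  exfalso
                  revert hx
                  split <;> simp_all
        · have hc' : ¬ (c = '1' ∨ c = '2' ∨ c = '3' ∨ c = '4') := by
            intro h
            rcases (by simpa [List.contains_eq_mem, or_assoc] using hc : ¬ c ∈ "1234".toList)
              (by rcases h with rfl | rfl | rfl | rfl <;> simp)
          simp [hc']
      · constructor
        · intro hx
          exfalso
          split at hx <;> split at hx <;> simp_all
        · intro hx
          exfalso
          split at hx
          · rename_i heq
            split at heq <;> simp_all
          · simp_all

-- ===== VERDICT (by name: the statement is the Claim_ definition above) =====
theorem infer_backbone_from_state_dict_py_spec : Claim_equal_infer_backbone_from_state_dict_py := by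
  intro sd _
  unfold Spec_infer_backbone_from_state_dict_py
  unfold infer_backbone_from_state_dict_py infer_backbone_from_state_dict_py_alt
  simp only [List.map_map]
  set nk : List String := sd.map (fun p => pvNorm p.1) with hnk
  have hmap : (sd.map (pvNorm ∘ fun p => p.1)) = nk := rfl
  rw [hmap]
  -- B's fold as a fold of the score list
  have hfold : sd.foldl (fun best p => max best (pvScore (pvNorm p.1))) 0
      = (nk.map pvScore).foldl max 0 := by
    rw [hnk, List.map_map, List.foldl_map]; rfl
  rw [hfold]
  set best := (nk.map pvScore).foldl max 0 with hbest
  have hub : best = 0 ∨ best ∈ nk.map pvScore := PySem.List.foldl_max_mem _ _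
  have hlb : ∀ y ∈ nk.map pvScore, y ≤ best := (PySem.List.le_foldl_max _ _).2
  by_cases hconv : nk.any pvConv = true
  · -- some key is bottleneck evidence: A returns resnet50, best = 2
    obtain ⟨k, hkmem, hkc⟩ := List.any_eq_true.mp hconv
    have h2 : (2:Nat) ≤ best :=
      hlb _ (List.mem_map.mpr ⟨k, hkmem, (pvScore_eq_two_iff k).mpr hkc⟩)
    have hle : best ≤ 2 := by
      rcases hub with h | h
      · omega
      · obtain ⟨k', _, hk'⟩ := List.mem_map.mp h
        rw [← hk']; exact pvScore_le_two k'
    have : best = 2 := le_antisymm hle h2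
    rw [if_pos (show nk.any (fun k => PySem.Str.isIn ".conv3.weight" k && PySem.Str.startswith k "layer") = true from hconv)]
    rw [this]; rfl
  · have hconv' : ∀ k ∈ nk, pvConv k = false := by
      intro k hk
      cases h : pvConv k
      · rfl
      · exact absurd (List.any_eq_true.mpr ⟨k, hk, h⟩) hconv
    rw [if_neg (show ¬ (nk.any (fun k => PySem.Str.isIn ".conv3.weight" k && PySem.Str.startswith k "layer") = true) from hconv)]
    have hsle1 : ∀ k ∈ nk, pvScore k ≤ 1 := by
      intro k hk
      have h2 := pvScore_le_two k
      have hne : pvScore k ≠ 2 := by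
        intro h
        have hc := (pvScore_eq_two_iff k).mp h
        rw [hconv' k hk] at hc
        exact absurd hc (by simp)
      omega
    simp only [dict_cond_eq]
    by_cases h34 : nk.any pvGE2 = true
    · obtain ⟨k, hkmem, hkg⟩ := List.any_eq_true.mp h34
      have h1 : (1:Nat) ≤ best :=
        hlb _ (List.mem_map.mpr ⟨k, hkmem, (pvScore_eq_one_iff (hconv' k hkmem)).mpr hkg⟩)
      have hle : best ≤ 1 := by
        rcases hub with h | h
        · omega
        · obtain ⟨k', hk', hk''⟩ := List.mem_map.mp h
          rw [← hk'']; exact hsle1 k' hk'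
      have : best = 1 := le_antisymm hle h1
      rw [if_pos h34, this]
      rfl
    · have h0 : ∀ k ∈ nk, pvScore k = 0 := by
        intro k hk
        have hne1 : pvScore k ≠ 1 := by
          intro h
          exact absurd (List.any_eq_true.mpr ⟨k, hk, (pvScore_eq_one_iff (hconv' k hk)).mp h⟩) h34
        have := hsle1 k hk
        omega
      have : best = 0 := by
        rcases hub with h | h
        · exact h
        · obtain ⟨k', hk', hk''⟩ := List.mem_map.mp h
          rw [← hk'']; exact h0 k' hk'
      rw [if_neg h34, this]; rfl
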